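-- pv_equiv track=rewrite | github.com/sean-galloway/RTLDesignSherpa | bin/trim_wavedrom.py | find_global_activity_range
-- ===== SOURCE A (Python) =====
-- def analyze_signal_activity(wave_string):
--     """Analyze a wave string to find first and last activity
--
--     Args:
--         wave_string: WaveDrom wave notation string
--
--     Returns:
--         (first_active, last_active) - cycle indices, or (None, None) if no activity
--     """
--     if not wave_string or len(wave_string) == 0:
--         return None, None
--
--     first_char = wave_string[0]
--     first_active = None
--     last_active = None
--
--     for i, char in enumerate(wave_string):
--         # Activity = any change from initial character (except '.' for clocks)
--         if char != first_char and char != '.':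
--             if first_active is None:
--                 first_active = i
--             last_active = i
--         # For clocks, transitions count as activity
--         elif char == 'p' or char == 'n' or char == 'P' or char == 'N':
--             if first_active is None:
--                 first_active = i
--             last_active = i
--
--     return first_active, last_active
--
-- def find_global_activity_range(signals, buffer_before=2, buffer_after=2):
--     """Find the range of cycles containing meaningful activity across all signals
--
--     Args:
--         signals: List of signal dictionaries from WaveJSON
--         buffer_before: Number of cycles to keep before first activity
--         buffer_after: Number of cycles to keep after last activity
--
--     Returns:
--         (start_cycle, end_cycle) - inclusive range, or (0, 0) if no activity
--     """
--     global_first = None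
--     global_last = None
--
--     for signal in signals:
--         wave = signal.get('wave', '')
--         if not wave:
--             continue
--
--         first, last = analyze_signal_activity(wave)
--
--         if first is not None:
--             if global_first is None or first < global_first:
--                 global_first = first
--         if last is not None:
--             if global_last is None or last > global_last:
--                 global_last = last
--
--     # No activity found
--     if global_first is None or global_last is None:
--         return 0, 0
--
--     # Apply buffer
--     start = max(0, global_first - buffer_before)
--     end = global_last + buffer_after
--
--     return start, end
-- ===== SOURCE B (Python) =====
-- def _active(ch, first_char):
--     return (ch != first_char and ch != '.') or ch in 'pnPN'
--
-- def find_global_activity_range(signals, buffer_before=2, buffer_after=2):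
--     """Two separate directional scans per wave: forward scan (break at first
--     active char) for the global first, reverse scan (break at last active char)
--     for the global last."""
--     global_first = None
--     global_last = None
--
--     for sig in signals:
--         wave = sig.get('wave', '')
--         if not wave:
--             continue
--         fc = wave[0]
--         for i, ch in enumerate(wave):
--             if _active(ch, fc):
--                 if global_first is None or i < global_first:
--                     global_first = i
--                 break
--         for i in range(len(wave) - 1, -1, -1):
--             if _active(wave[i], fc):
--                 if global_last is None or i > global_last:
--                     global_last = i
--                 break
--
--     if global_first is None or global_last is None:
--         return 0, 0
--     return max(0, global_first - buffer_before), global_last + buffer_after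
-- ===== Notes on version B (the rewrite author's own statement) =====
-- stated objective: alternative
-- what changed: A computes each wave's first and last active index in one combined forward scan carrying an (first, last) pair; B uses two directional scans per wave - a forward scan that breaks at the first active character and a reverse scan that breaks at the last - and merges each into the global min/max separately.
import Mathlib
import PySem

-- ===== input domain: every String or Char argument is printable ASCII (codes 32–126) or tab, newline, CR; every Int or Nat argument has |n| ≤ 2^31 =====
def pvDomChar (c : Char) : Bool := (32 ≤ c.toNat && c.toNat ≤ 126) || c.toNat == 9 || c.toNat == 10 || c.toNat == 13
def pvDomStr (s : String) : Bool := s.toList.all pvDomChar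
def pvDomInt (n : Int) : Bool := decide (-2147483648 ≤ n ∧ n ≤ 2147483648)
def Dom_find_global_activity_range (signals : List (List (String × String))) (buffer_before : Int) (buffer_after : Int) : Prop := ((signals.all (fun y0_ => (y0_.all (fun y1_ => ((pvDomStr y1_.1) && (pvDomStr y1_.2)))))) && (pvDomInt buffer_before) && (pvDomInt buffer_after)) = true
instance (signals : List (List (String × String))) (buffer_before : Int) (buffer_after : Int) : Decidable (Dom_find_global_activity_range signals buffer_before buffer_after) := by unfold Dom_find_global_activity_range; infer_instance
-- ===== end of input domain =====

-- B replaces A's single combined per-wave scan with two directional scans per wave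
-- (forward with break for the first active index, reverse with break for the last);
-- objective: alternative decomposition, same cost.

-- ===== PORT A =====

-- one iteration of analyze_signal_activity's for-loop body
def pvStepA (fc : Char) (st : Option Int × Option Int) (i : Int) (c : Char) : Option Int × Option Int :=
  if c ≠ fc ∧ c ≠ '.' then
    ((match st.1 with | none => some i | some f => some f), some i)
  else if c = 'p' ∨ c = 'n' ∨ c = 'P' ∨ c = 'N' then
    ((match st.1 with | none => some i | some f => some f), some i)
  else st

-- the enumerate loop of analyze_signal_activity
def pvLoopA (fc : Char) : List Char → Int → (Option Int × Option Int) → Option Int × Option Int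
  | [], _, st => st
  | c :: rest, i, st => pvLoopA fc rest (i + 1) (pvStepA fc st i c)

def analyze_signal_activity (wave_string : String) : Option Int × Option Int :=
  match wave_string.toList with
  | [] => (none, none)
  | fc :: _ => pvLoopA fc wave_string.toList 0 (none, none)

-- the body of find_global_activity_range's for-loop over signals
def pvSigStepA (st : Option Int × Option Int) (signal : List (String × String)) : Option Int × Option Int :=
  let wave := ((signal.lookup "wave").getD "")
  if wave.toList = [] then st
  else
    let fl := analyze_signal_activity wave
    let gf := match fl.1 with
      | none => st.1
      | some f => match st.1 with
        | none => some f
        | some g => if f < g then some f else some g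
    let gl := match fl.2 with
      | none => st.2
      | some l => match st.2 with
        | none => some l
        | some g => if l > g then some l else some g
    (gf, gl)

def find_global_activity_range (signals : List (List (String × String))) (buffer_before : Int) (buffer_after : Int) : Int × Int :=
  let st := signals.foldl pvSigStepA (none, none)
  match st with
  | (none, _) => (0, 0)
  | (_, none) => (0, 0)
  | (some gf, some gl) => (max 0 (gf - buffer_before), gl + buffer_after)

-- ===== PORT B =====

-- _active(ch, first_char)
def pvActiveB (c fc : Char) : Bool :=
  ((c != fc) && (c != '.')) || (c == 'p' || c == 'n' || c == 'P' || c == 'N')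

-- forward scan, break at first active index
def pvFirstB (fc : Char) : List Char → Int → Option Int
  | [], _ => none
  | c :: rest, i => if pvActiveB c fc then some i else pvFirstB fc rest (i + 1)

-- reverse scan (range(len-1, -1, -1)): called on the reversed char list, index counts down
def pvLastB (fc : Char) : List Char → Int → Option Int
  | [], _ => none
  | c :: rest, i => if pvActiveB c fc then some i else pvLastB fc rest (i - 1)

-- per-signal update: forward scan for the first, reverse scan for the last
def pvSigStepB (st : Option Int × Option Int) (signal : List (String × String)) : Option Int × Option Int :=
  let wave := ((signal.lookup "wave").getD "")
  match wave.toList with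
  | [] => st
  | fc :: rest =>
    let cs := fc :: rest
    let gf := match pvFirstB fc cs 0 with
      | none => st.1
      | some i => match st.1 with
        | none => some i
        | some g => if i < g then some i else some g
    let gl := match pvLastB fc cs.reverse ((cs.length : Int) - 1) with
      | none => st.2
      | some i => match st.2 with
        | none => some i
        | some g => if i > g then some i else some g
    (gf, gl)

def find_global_activity_range_alt (signals : List (List (String × String))) (buffer_before : Int) (buffer_after : Int) : Int × Int :=
  let st := signals.foldl pvSigStepB (none, none)
  match st with
  | (none, _) => (0, 0)
  | (_, none) => (0, 0)
  | (some gf, some gl) => (max 0 (gf - buffer_before), gl + buffer_after)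

-- ===== PRECONDITION & SPEC =====
def Spec_find_global_activity_range (signals : List (List (String × String))) (buffer_before : Int) (buffer_after : Int) (out : Int × Int) : Prop := out = find_global_activity_range_alt signals buffer_before buffer_after
instance (signals : List (List (String × String))) (buffer_before : Int) (buffer_after : Int) (out : Int × Int) : Decidable (Spec_find_global_activity_range signals buffer_before buffer_after out) := by unfold Spec_find_global_activity_range; infer_instance

-- ===== CLAIM (what is proved, stated in full; the proofs are below) =====
def Claim_equal_find_global_activity_range : Prop := ∀ (signals : List (List (String × String))) (buffer_before : Int) (buffer_after : Int), Dom_find_global_activity_range signals buffer_before buffer_after → Spec_find_global_activity_range signals buffer_before buffer_after (find_global_activity_range signals buffer_before buffer_after)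

-- ===== LEMMAS AND PROOFS =====

-- proof-only: left-biased choice on options
def pvOr (a b : Option Int) : Option Int :=
  match a with | some x => some x | none => b

theorem pvOr_some (x : Int) (b : Option Int) : pvOr (some x) b = some x := rfl
theorem pvOr_none (b : Option Int) : pvOr none b = b := rfl
theorem pvOr_none_right (a : Option Int) : pvOr a none = a := by cases a <;> rfl
theorem pvOr_assoc (a b c : Option Int) : pvOr (pvOr a b) c = pvOr a (pvOr b c) := by
  cases a <;> rfl

-- proof-only: forward "last active index" scan
def pvLastF (fc : Char) : List Char → Int → Option Int
  | [], _ => none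
  | c :: rest, i => pvOr (pvLastF fc rest (i + 1)) (if pvActiveB c fc then some i else none)

theorem pvStepA_eq (fc : Char) (st : Option Int × Option Int) (i : Int) (c : Char) :
    pvStepA fc st i c =
      if pvActiveB c fc then (pvOr st.1 (some i), some i) else st := by
  unfold pvStepA pvActiveB pvOr
  by_cases h1 : c ≠ fc ∧ c ≠ '.' <;> by_cases h2 : c = 'p' ∨ c = 'n' ∨ c = 'P' ∨ c = 'N' <;>
    first
    | (rcases h2 with h | h | h | h <;> subst h <;> cases st.1 <;> simp_all)
    | (cases st.1 <;> simp_all)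

theorem pvLoopA_eq (fc : Char) (cs : List Char) : ∀ (i : Int) (f l : Option Int),
    pvLoopA fc cs i (f, l) = (pvOr f (pvFirstB fc cs i), pvOr (pvLastF fc cs i) l) := by
  induction cs with
  | nil => intro i f l; cases f <;> simp [pvLoopA, pvFirstB, pvLastF, pvOr]
  | cons c rest ih =>
    intro i f l
    rw [pvLoopA, pvStepA_eq]
    by_cases h : pvActiveB c fc
    · simp only [h, if_pos]
      rw [ih]
      simp [pvFirstB, pvLastF, h, pvOr_assoc, pvOr_some]
    · simp only [h, Bool.false_eq_true, if_neg, not_false_iff]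
      rw [ih]
      simp [pvFirstB, pvLastF, h, pvOr_none_right]

theorem pvLastB_append (fc : Char) (xs ys : List Char) : ∀ i : Int,
    pvLastB fc (xs ++ ys) i = pvOr (pvLastB fc xs i) (pvLastB fc ys (i - xs.length)) := by
  induction xs with
  | nil => intro i; simp [pvLastB, pvOr_none]
  | cons x rest ih =>
    intro i
    by_cases h : pvActiveB x fc
    · simp [pvLastB, h, pvOr_some]
    · simp only [List.cons_append, pvLastB, h, Bool.false_eq_true, if_neg, not_false_iff]
      rw [ih]
      congr 2
      push_cast [List.length_cons]
      ring

theorem pvLastF_eq_pvLastB (fc : Char) (cs : List Char) : ∀ i : Int,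
    pvLastF fc cs i = pvLastB fc cs.reverse (i + cs.length - 1) := by
  induction cs with
  | nil => intro i; simp [pvLastF, pvLastB]
  | cons c rest ih =>
    intro i
    rw [pvLastF, List.reverse_cons, pvLastB_append, ih]
    congr 1
    · congr 1
      push_cast [List.length_cons]
      ring
    · have h2 : i + (((c :: rest).length : Int)) - 1 - (rest.reverse.length : Int) = i := by
        push_cast [List.length_cons, List.length_reverse]
        ring
      rw [h2]
      cases h : pvActiveB c fc <;> simp [pvLastB, h]

-- per-wave: A's combined scan yields exactly B's two directional scans
theorem analyze_eq (wave : String) (fc : Char) (rest : List Char) (h : wave.toList = fc :: rest) :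
    analyze_signal_activity wave =
      (pvFirstB fc (fc :: rest) 0,
       pvLastB fc (fc :: rest).reverse (((fc :: rest).length : Int) - 1)) := by
  have h0 : analyze_signal_activity wave = pvLoopA fc (fc :: rest) 0 (none, none) := by
    unfold analyze_signal_activity
    rw [h]
  rw [h0, pvLoopA_eq, pvOr_none, pvOr_none_right, pvLastF_eq_pvLastB]
  have : (0 : Int) + (((fc :: rest).length : Int)) - 1 = (((fc :: rest).length : Int)) - 1 := by ring
  rw [this]

theorem pvSigStep_eq : pvSigStepA = pvSigStepB := by
  funext st signal
  unfold pvSigStepA pvSigStepB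
  cases h : ((signal.lookup "wave").getD "").toList with
  | nil => simp [h]
  | cons fc rest =>
    have hne : (fc :: rest : List Char) ≠ [] := by simp
    simp only [h, if_neg hne, analyze_eq _ fc rest h]

-- ===== VERDICT (by name: the statement is the Claim_ definition above) =====
theorem find_global_activity_range_spec : Claim_equal_find_global_activity_range := by
  intro signals buffer_before buffer_after _
  unfold Spec_find_global_activity_range find_global_activity_range find_global_activity_range_alt
  rw [pvSigStep_eq]
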